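-- pv_equiv track=rewrite | github.com/technomancy7/aos | archived/jade/jade.py | invert_direction
-- ===== SOURCE A (Python) =====
-- def invert_direction(d):
--     dirs = {
--         "north": "south",
--         "east": "west",
--         "up": "down",
--         "in": "out"
--     }
--
--     for direc1, direc2 in dirs.items():
--         if d == direc1: return direc2
--         if d == direc2: return direc1
--
--     return None
-- ===== SOURCE B (Python) =====
-- _OPPOSITE = {
--     "north": "south", "south": "north",
--     "east": "west", "west": "east",
--     "up": "down", "down": "up",
--     "in": "out", "out": "in",
-- }
--
-- def invert_direction(d):
--     return _OPPOSITE.get(d)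
-- ===== Notes on version B (the rewrite author's own statement) =====
-- stated objective: idiomatic
-- what changed: Replaces the loop over four pairs with dual comparisons by a single flat 8-entry opposite-direction dictionary keyed directly on the input, returned via .get.
import Mathlib
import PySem

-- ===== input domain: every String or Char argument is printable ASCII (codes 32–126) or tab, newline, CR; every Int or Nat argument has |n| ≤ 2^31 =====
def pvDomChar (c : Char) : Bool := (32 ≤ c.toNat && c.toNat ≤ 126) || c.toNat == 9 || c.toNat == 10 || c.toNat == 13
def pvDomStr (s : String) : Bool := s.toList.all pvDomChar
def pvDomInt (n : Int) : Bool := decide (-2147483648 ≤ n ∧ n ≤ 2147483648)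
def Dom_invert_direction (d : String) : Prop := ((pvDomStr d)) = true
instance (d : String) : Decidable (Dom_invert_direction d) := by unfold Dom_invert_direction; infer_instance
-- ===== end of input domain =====

-- B replaces A's loop over four pairs (key/value comparisons) with one flat 8-entry opposite table and a direct lookup.


-- ===== PORT A =====
-- dirs.items() loop: each pair checked key-then-value
def invA_loop (d : String) : List (String × String) → Option String
  | [] => none
  | (a, b) :: rest =>
    if d = a then some b
    else if d = b then some a
    else invA_loop d rest

def invert_direction (d : String) : Option String :=
  let dirs : PySem.Dict String String :=
    PySem.Dict.ofList [("north", "south"), ("east", "west"), ("up", "down"), ("in", "out")]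
  invA_loop d dirs.items

-- ===== PORT B =====
-- B: one flat 8-entry opposite table, direct lookup
def oppositeTable : PySem.Dict String String :=
  PySem.Dict.ofList
    [("north", "south"), ("south", "north"),
     ("east", "west"), ("west", "east"),
     ("up", "down"), ("down", "up"),
     ("in", "out"), ("out", "in")]

def invert_direction_alt (d : String) : Option String :=
  oppositeTable.get? d

-- ===== PRECONDITION & SPEC =====
def Spec_invert_direction (d : String) (out : Option String) : Prop := out = invert_direction_alt d
instance (d : String) (out : Option String) : Decidable (Spec_invert_direction d out) := by unfold Spec_invert_direction; infer_instance

-- ===== CLAIM (what is proved, stated in full; the proofs are below) =====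
def Claim_equal_invert_direction : Prop := ∀ (d : String), Dom_invert_direction d → Spec_invert_direction d (invert_direction d)

-- ===== LEMMAS AND PROOFS =====

-- ===== VERDICT (by name: the statement is the Claim_ definition above) =====
theorem invert_direction_spec : Claim_equal_invert_direction := by
  intro d _
  unfold Spec_invert_direction invert_direction invert_direction_alt oppositeTable
  have hA : (PySem.Dict.ofList
      [("north", "south"), ("east", "west"), ("up", "down"), ("in", "out")]
      : PySem.Dict String String).items =
      [("north", "south"), ("east", "west"), ("up", "down"), ("in", "out")] := by decide
  have hB : (PySem.Dict.ofList
      [("north", "south"), ("south", "north"), ("east", "west"), ("west", "east"),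
       ("up", "down"), ("down", "up"), ("in", "out"), ("out", "in")]
      : PySem.Dict String String).items =
      [("north", "south"), ("south", "north"), ("east", "west"), ("west", "east"),
       ("up", "down"), ("down", "up"), ("in", "out"), ("out", "in")] := by decide
  simp only [PySem.Dict.get?, hA, hB]
  by_cases h1 : d = "north" <;> by_cases h2 : d = "south" <;>
  by_cases h3 : d = "east" <;> by_cases h4 : d = "west" <;>
  by_cases h5 : d = "up" <;> by_cases h6 : d = "down" <;>
  by_cases h7 : d = "in" <;> by_cases h8 : d = "out" <;>
  simp_all [invA_loop, List.find?]
  rw [beq_eq_false_iff_ne.mpr (Ne.symm h1), beq_eq_false_iff_ne.mpr (Ne.symm h2),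
      beq_eq_false_iff_ne.mpr (Ne.symm h3), beq_eq_false_iff_ne.mpr (Ne.symm h4),
      beq_eq_false_iff_ne.mpr (Ne.symm h5), beq_eq_false_iff_ne.mpr (Ne.symm h6),
      beq_eq_false_iff_ne.mpr (Ne.symm h7), beq_eq_false_iff_ne.mpr (Ne.symm h8)]
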